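-- pv_equiv track=rewrite | github.com/sobogil/Algorithm | 알고리즘 학교 강의/직원.py | find_much
-- ===== SOURCE A (Python) =====
-- def find_much(f,u):
--     max_subset=[]
--     result=[]
--     if len(u)==1: #만약 u가 한개밖에 남지 않았다면 원소가 작은 순부터 파악한다
--         target_element = u[0]
--         result = find_list_with_element(f, target_element) #파악하는 함수
--     else: #아닐 경우 가장 원소의 갯수가 많은 집합을 찾는다
--         max_subset.append(max(f, key=len))
--         for sublist in max_subset:
--             for item in sublist:
--                 result.append(item)
--     return result
--
-- def find_list_with_element(matrix, target_element):
--     for row in sorted(matrix, key=len):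
--         if target_element in row:
--             return row
--     return None
-- ===== SOURCE B (Python) =====
-- def find_much(f, u):
--     if len(u) == 1:
--         return min((row for row in f if u[0] in row), key=len, default=None)
--     return list(max(f, key=len))
-- ===== Notes on version B (the rewrite author's own statement) =====
-- stated objective: simpler
-- what changed: Replaces the sort-the-matrix-then-scan lookup with a single linear min-by-length pass over the rows containing the target (default None), and replaces the append+double-loop flattening of the longest row with list(max(f, key=len)).
import Mathlib
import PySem

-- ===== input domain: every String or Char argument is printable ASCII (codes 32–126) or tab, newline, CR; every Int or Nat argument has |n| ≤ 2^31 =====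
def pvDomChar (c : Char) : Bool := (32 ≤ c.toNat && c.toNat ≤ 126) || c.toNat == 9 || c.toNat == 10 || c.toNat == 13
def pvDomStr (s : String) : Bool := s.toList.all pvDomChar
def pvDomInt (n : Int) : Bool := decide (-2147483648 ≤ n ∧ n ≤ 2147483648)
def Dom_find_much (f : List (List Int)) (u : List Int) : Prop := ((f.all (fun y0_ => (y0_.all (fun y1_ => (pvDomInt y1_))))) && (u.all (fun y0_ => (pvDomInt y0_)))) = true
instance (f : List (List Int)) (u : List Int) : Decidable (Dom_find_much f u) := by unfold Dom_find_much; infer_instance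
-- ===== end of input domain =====

-- B replaces A's sort-then-scan (and the append/double-loop flattening) by one linear
-- min-by-length pass over the rows containing the target; objective: simpler.

-- ===== PORT A =====
-- the early-return 'for row in …: if target in row: return row' loop
def flwe_loop (target : Int) : List (List Int) → Option (List Int)
  | [] => none
  | row :: rest => if row.contains target then some row else flwe_loop target rest

def find_list_with_element (matrix : List (List Int)) (target_element : Int) : Option (List Int) :=
  flwe_loop target_element (PySem.List.sorted matrix (fun r => r.length) false)

def find_much (f : List (List Int)) (u : List Int) : Option (List Int) :=
  if u.length == 1 then
    match PySem.List.pyGet? u 0 with      -- u[0]; in range since len(u) == 1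
    | none => none
    | some target_element => find_list_with_element f target_element
  else
    match PySem.List.max? f (fun r => r.length) with
    | none => none                        -- Python: max([]) raises ValueError; excluded by Pre_
    | some m =>
      -- max_subset = [m]; for sublist in max_subset: for item in sublist: result.append(item)
      some ([m].foldl (fun res sublist => sublist.foldl (fun r item => r ++ [item]) res) [])

-- ===== PORT B =====
def find_much_alt (f : List (List Int)) (u : List Int) : Option (List Int) :=
  if u.length == 1 then
    match PySem.List.pyGet? u 0 with
    | none => none
    | some t => PySem.List.min? (f.filter (fun row => row.contains t)) (fun r => r.length)
  else
    match PySem.List.max? f (fun r => r.length) with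
    | none => none                        -- Python: max([]) raises ValueError; excluded by Pre_
    | some m => some m                    -- list(m): a fresh copy, same value

-- ===== PRECONDITION & SPEC =====
-- Pre_ excludes only f = [] with len(u) ≠ 1, where A's max(f, key=len) raises ValueError.
def Pre_find_much (f : List (List Int)) (u : List Int) : Prop := u.length = 1 ∨ f ≠ []
instance (f : List (List Int)) (u : List Int) : Decidable (Pre_find_much f u) := by unfold Pre_find_much; infer_instance
def pvWitness_find_much : List (List Int) × List Int := ([[1], [2, 3]], [1])

def Spec_find_much (f : List (List Int)) (u : List Int) (out : Option (List Int)) : Prop := out = find_much_alt f u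
instance (f : List (List Int)) (u : List Int) (out : Option (List Int)) : Decidable (Spec_find_much f u out) := by unfold Spec_find_much; infer_instance

-- ===== CLAIM (what is proved, stated in full; the proofs are below) =====
def Claim_equal_find_much : Prop := ∀ (f : List (List Int)) (u : List Int), Dom_find_much f u → Pre_find_much f u → Spec_find_much f u (find_much f u)

-- ===== LEMMAS AND PROOFS =====

-- flwe_loop with its membership test abstracted into a predicate p
def flweP (p : List Int → Bool) : List (List Int) → Option (List Int)
  | [] => none
  | row :: rest => if p row then some row else flweP p rest

theorem flwe_loop_eq (t : Int) (l : List (List Int)) :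
    flwe_loop t l = flweP (fun row => row.contains t) l := by
  induction l with
  | nil => rfl
  | cons row rest ih => simp only [flwe_loop, flweP, ih]

theorem find_list_with_element_eq (f : List (List Int)) (t : Int) :
    find_list_with_element f t
      = flweP (fun row => row.contains t) (PySem.List.sorted f (fun r => r.length) false) := by
  unfold find_list_with_element
  exact flwe_loop_eq t _

theorem flweP_mem (p : List Int → Bool) (l : List (List Int)) (b : List Int)
    (h : flweP p l = some b) : b ∈ l := by
  induction l with
  | nil => simp [flweP] at h
  | cons row rest ih =>
    simp only [flweP] at h
    by_cases hp : p row = true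
    · rw [if_pos hp] at h
      obtain rfl := Option.some.inj h
      exact List.mem_cons_self
    · rw [if_neg hp] at h
      exact List.mem_cons_of_mem _ (ih h)

-- the step of Python's min(_, key=len): keep the earlier element on ties
def pvMinStep (best : Option (List Int)) (x : List Int) : Option (List Int) :=
  match best with
  | none => some x
  | some m => if x.length < m.length then some x else some m

theorem pairwise_insertBy (x : List Int) (acc : List (List Int))
    (h : acc.Pairwise (fun a b => a.length ≤ b.length)) :
    (PySem.List.insertBy (fun a b => decide (a.length < b.length)) x acc).Pairwise
      (fun a b => a.length ≤ b.length) := by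
  induction acc with
  | nil => simp [PySem.List.insertBy]
  | cons y ys ih =>
    rcases List.pairwise_cons.mp h with ⟨hy, hys⟩
    by_cases hb : x.length < y.length
    · rw [show PySem.List.insertBy (fun a b => decide (a.length < b.length)) x (y :: ys)
            = x :: y :: ys from by simp [PySem.List.insertBy, hb]]
      refine List.pairwise_cons.mpr ⟨?_, h⟩
      intro z hz
      rcases List.mem_cons.mp hz with rfl | hz'
      · omega
      · exact le_of_lt (lt_of_lt_of_le hb (hy z hz'))
    · rw [show PySem.List.insertBy (fun a b => decide (a.length < b.length)) x (y :: ys)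
            = y :: PySem.List.insertBy (fun a b => decide (a.length < b.length)) x ys from by
          simp [PySem.List.insertBy, hb]]
      refine List.pairwise_cons.mpr ⟨?_, ih hys⟩
      intro z hz
      rcases (PySem.List.mem_insertBy _ _ _ _).mp hz with rfl | hz'
      · omega
      · exact hy z hz'

theorem flwe_insertBy (p : List Int → Bool) (x : List Int) (acc : List (List Int))
    (h : acc.Pairwise (fun a b => a.length ≤ b.length)) :
    flweP p (PySem.List.insertBy (fun a b => decide (a.length < b.length)) x acc)
      = if p x then pvMinStep (flweP p acc) x else flweP p acc := by
  induction acc with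
  | nil =>
    by_cases hp : p x = true
    · rw [if_pos hp]; simp [PySem.List.insertBy, flweP, pvMinStep, hp]
    · rw [if_neg hp]; simp [PySem.List.insertBy, flweP, hp]
  | cons y ys ih =>
    rcases List.pairwise_cons.mp h with ⟨hy, hys⟩
    by_cases hb : x.length < y.length
    · rw [show PySem.List.insertBy (fun a b => decide (a.length < b.length)) x (y :: ys)
            = x :: y :: ys from by simp [PySem.List.insertBy, hb]]
      simp only [flweP]
      by_cases hp : p x = true
      · rw [if_pos hp, if_pos hp]
        by_cases hpy : p y = true
        · rw [if_pos hpy]; simp [pvMinStep, hb]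
        · rw [if_neg hpy]
          cases hfy : flweP p ys with
          | none => simp [pvMinStep]
          | some b =>
            have hxb : x.length < b.length :=
              lt_of_lt_of_le hb (hy b (flweP_mem p ys b hfy))
            simp [pvMinStep, hxb]
      · rw [if_neg hp, if_neg hp]
    · rw [show PySem.List.insertBy (fun a b => decide (a.length < b.length)) x (y :: ys)
            = y :: PySem.List.insertBy (fun a b => decide (a.length < b.length)) x ys from by
          simp [PySem.List.insertBy, hb]]
      simp only [flweP]
      by_cases hpy : p y = true
      · rw [if_pos hpy, if_pos hpy]
        by_cases hp : p x = true
        · rw [if_pos hp]; simp [pvMinStep, hb]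
        · rw [if_neg hp]
      · rw [if_neg hpy, if_neg hpy]
        rw [ih hys]

theorem flwe_foldl (p : List Int → Bool) (xs acc : List (List Int))
    (h : acc.Pairwise (fun a b => a.length ≤ b.length)) :
    flweP p (xs.foldl (fun a x => PySem.List.insertBy (fun a b => decide (a.length < b.length)) x a) acc)
      = (xs.filter p).foldl pvMinStep (flweP p acc) := by
  induction xs generalizing acc with
  | nil => rfl
  | cons x xs ih =>
    simp only [List.foldl_cons]
    rw [ih _ (pairwise_insertBy x acc h), flwe_insertBy p x acc h]
    by_cases hp : p x = true
    · rw [if_pos hp, List.filter_cons_of_pos hp, List.foldl_cons]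
    · rw [if_neg hp, List.filter_cons_of_neg hp]

theorem min?_eq_foldl_pvMinStep (l : List (List Int)) :
    PySem.List.min? l (fun r => r.length) = l.foldl pvMinStep none := by
  simp only [PySem.List.min?]
  congr 1
  funext acc x
  cases acc <;> rfl

theorem flwe_eq_min (p : List Int → Bool) (f : List (List Int)) :
    flweP p (PySem.List.sorted f (fun r => r.length) false)
      = PySem.List.min? (f.filter p) (fun r => r.length) := by
  rw [PySem.List.sorted_eq_foldl_insertBy, flwe_foldl p f [] List.Pairwise.nil,
    min?_eq_foldl_pvMinStep]
  rfl

-- ===== VERDICT (by name: the statement is the Claim_ definition above) =====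
theorem find_much_spec : Claim_equal_find_much := by
  intro f u _ _
  unfold Spec_find_much find_much find_much_alt
  by_cases h1 : (u.length == 1) = true
  · rw [if_pos h1, if_pos h1]
    cases PySem.List.pyGet? u 0 with
    | none => rfl
    | some t =>
      show find_list_with_element f t = _
      rw [find_list_with_element_eq, flwe_eq_min]
  · rw [if_neg h1, if_neg h1]
    cases PySem.List.max? f (fun r => r.length) with
    | none => rfl
    | some m =>
      show some ([m].foldl _ []) = some m
      rw [List.foldl_cons, List.foldl_nil, PySem.List.foldl_append_singleton, List.nil_append]
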